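-- pv_equiv track=rewrite | github.com/dizhouwu/data_science | getUnallottedUsers.py | getUnallottedUsers
-- ===== SOURCE A (Python) =====
-- from typing import List, Tuple
--
-- def getUnallottedUsers(bids: List[Tuple[int, int, int, int]], totalShares: int) -> List[int]:
--     UID, SHARES, PRICE, TIME = range(4)
--
--     bids.sort(reverse=True, key=lambda bid: [bid[PRICE], -bid[TIME]])
--
--     shares_by_uid_by_price = {}
--     for bid in bids:
--         uid = bid[UID]
--         shares = bid[SHARES]
--         price = bid[PRICE]
--         if price in shares_by_uid_by_price:
--             shares_by_uid_by_price[price][uid] = shares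
--         else:
--             shares_by_uid_by_price[price] = {uid: shares}
--
--     all_unallotted = []
--     for shares_by_uid in shares_by_uid_by_price.values():
--         unallotted = set(shares_by_uid.keys())
--         while shares_by_uid and totalShares > 0:
--             allotted = set()
--             for uid, shares in shares_by_uid.items():
--                 if shares == 0:
--                     allotted.add(uid)
--                 elif totalShares > 0:
--                     shares_by_uid[uid] -= 1
--                     totalShares -= 1
--                     unallotted.discard(uid)
--                 elif totalShares == 0:
--                     break
--
--             for uid in allotted:
--                 del shares_by_uid[uid]
--         all_unallotted.extend(unallotted)
--
--     return sorted(all_unallotted)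
-- ===== SOURCE B (Python) =====
-- from typing import List, Tuple
--
-- def getUnallottedUsers(bids: List[Tuple[int, int, int, int]], totalShares: int) -> List[int]:
--     UID, SHARES, PRICE, TIME = range(4)
--     bids.sort(reverse=True, key=lambda bid: [bid[PRICE], -bid[TIME]])
--
--     groups = {}
--     for uid, shares, price, _time in bids:
--         groups.setdefault(price, {})[uid] = shares
--
--     unallotted = []
--     for g in groups.values():
--         served = [u for u, s in g.items() if s != 0]
--         k = max(0, min(totalShares, len(served)))
--         unallotted.extend(u for u, s in g.items() if s == 0)
--         unallotted.extend(served[k:])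
--         totalShares -= sum(g.values())
--     return sorted(unallotted)
-- ===== Notes on version B (the rewrite author's own statement) =====
-- stated objective: faster
-- what changed: A simulates the round-robin allotment one share at a time (a while-loop of rounds per price group); B computes each group's outcome arithmetically in one pass: the unallotted users are those bidding 0 shares plus the positive bidders beyond the first min(totalShares, #nonzero bidders), and the pool shrinks by the group's share sum; Pre_ excludes bids requesting a negative share count (malformed input outside the auction's natural domain), where A's round-robin silently drains the whole remaining pool inside that price group.
-- outside the precondition, e.g. on getUnallottedUsers([(1, -1, 5, 0), (2, 1, 4, 0)], 2): A returns [2], B returns []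
import Mathlib
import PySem

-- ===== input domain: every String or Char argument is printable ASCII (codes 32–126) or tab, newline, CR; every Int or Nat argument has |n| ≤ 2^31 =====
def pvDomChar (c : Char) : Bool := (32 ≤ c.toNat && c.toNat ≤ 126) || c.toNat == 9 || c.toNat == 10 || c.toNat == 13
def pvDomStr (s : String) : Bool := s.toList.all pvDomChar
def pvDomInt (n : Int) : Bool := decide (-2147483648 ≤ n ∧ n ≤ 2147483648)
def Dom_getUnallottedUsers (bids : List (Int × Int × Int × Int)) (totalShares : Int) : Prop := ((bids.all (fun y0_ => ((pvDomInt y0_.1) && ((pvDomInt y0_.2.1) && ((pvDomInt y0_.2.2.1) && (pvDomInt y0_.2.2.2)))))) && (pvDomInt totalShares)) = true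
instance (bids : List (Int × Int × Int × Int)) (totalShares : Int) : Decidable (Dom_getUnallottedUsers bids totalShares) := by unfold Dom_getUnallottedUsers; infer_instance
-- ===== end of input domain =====

-- B replaces A's round-robin simulation of the allotment (O(totalShares) rounds) by a per-price-group
-- arithmetic computation; both ports model the RETURN value (both Pythons sort `bids` in place identically).

-- ===== PORT A =====
-- One pass of A's inner `for uid, shares in shares_by_uid.items():` loop over a snapshot `l` of the
-- items (faithful: the loop only mutates the value at the key currently visited), threading the dict,
-- totalShares, `unallotted` and `allotted`.  The final `else` arm is Python's fall-through when
-- totalShares < 0 (no `elif` fires).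
def pvRoundA (l : List (Int × Int)) (d : PySem.Dict Int Int) (T : Int)
    (un al : PySem.Set Int) : PySem.Dict Int Int × Int × PySem.Set Int × PySem.Set Int :=
  match l with
  | [] => (d, T, un, al)
  | (uid, s) :: rest =>
    if s = 0 then pvRoundA rest d T un (PySem.Set.add al uid)
    else if 0 < T then
      pvRoundA rest (d.modify uid 0 (· - 1)) (T - 1) (PySem.Set.discard un uid) al
    else if T = 0 then (d, T, un, al)  -- break
    else pvRoundA rest d T un al

-- termination facts for A's while-loop (cited in pvWhileA's decreasing_by)
theorem pvRoundA_T_le (l : List (Int × Int)) (d : PySem.Dict Int Int) (T : Int)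
    (un al : PySem.Set Int) : (pvRoundA l d T un al).2.1 ≤ T := by
  induction l generalizing d T un al with
  | nil => simp [pvRoundA]
  | cons p rest ih =>
    obtain ⟨u, s⟩ := p
    simp only [pvRoundA]
    split_ifs with h1 h2 h3
    · exact ih ..
    · exact le_trans (ih ..) (by omega)
    · simp
    · exact ih ..

theorem pvRoundA_keys (l : List (Int × Int)) (d : PySem.Dict Int Int) (T : Int)
    (un al : PySem.Set Int) (h : ∀ p ∈ l, p.1 ∈ d.keys) :
    (pvRoundA l d T un al).1.keys = d.keys := by
  induction l generalizing d T un al with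
  | nil => simp [pvRoundA]
  | cons p rest ih =>
    obtain ⟨u, s⟩ := p
    simp only [pvRoundA]
    split_ifs with h1 h2 h3
    · exact ih _ _ _ _ (fun q hq => h q (List.mem_cons_of_mem _ hq))
    · have hu : u ∈ d.keys := h (u, s) (List.mem_cons_self ..)
      have hc : d.contains u = true := (PySem.Dict.contains_iff_mem_keys d u).mpr hu
      have hk : (d.modify u 0 (· - 1)).keys = d.keys := by
        simp only [PySem.Dict.modify]
        exact PySem.Dict.keys_insert_of_contains d _ hc
      rw [ih _ _ _ _ (fun q hq => by rw [hk]; exact h q (List.mem_cons_of_mem _ hq)), hk]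
    · rfl
    · exact ih _ _ _ _ (fun q hq => h q (List.mem_cons_of_mem _ hq))

theorem pvRoundA_al_mono (l : List (Int × Int)) (d : PySem.Dict Int Int) (T : Int)
    (un al : PySem.Set Int) : ∀ x ∈ al, x ∈ (pvRoundA l d T un al).2.2.2 := by
  induction l generalizing d T un al with
  | nil => simp [pvRoundA]
  | cons p rest ih =>
    obtain ⟨u, s⟩ := p
    intro x hx
    simp only [pvRoundA]
    split_ifs with h1 h2 h3
    · exact ih _ _ _ _ _ ((PySem.Set.mem_add al u x).mpr (Or.inl hx))
    · exact ih _ _ _ _ _ hx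
    · exact hx
    · exact ih _ _ _ _ _ hx

theorem foldl_erase_items (l : List Int) (d : PySem.Dict Int Int) :
    (l.foldl PySem.Dict.erase d).items = d.items.filter (fun p => decide (p.1 ∉ l)) := by
  induction l generalizing d with
  | nil => simp
  | cons x xs ih =>
    rw [List.foldl_cons, ih]
    simp only [PySem.Dict.erase, List.filter_filter]
    apply List.filter_congr
    intro p _
    by_cases h1 : p.1 = x <;> by_cases h2 : p.1 ∈ xs <;> simp [h1, h2]

-- A's `while shares_by_uid and totalShares > 0:` loop for one price group: run a round over the
-- current items, then `for uid in allotted: del shares_by_uid[uid]` (deletion result is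
-- iteration-order independent), and repeat.  Returns (unallotted, totalShares).
def pvWhileA (d : PySem.Dict Int Int) (T : Int) (un : PySem.Set Int) : PySem.Set Int × Int :=
  if h : d.items ≠ [] ∧ 0 < T then
    pvWhileA
      (((pvRoundA d.items d T un PySem.Set.empty).2.2.2 : List Int).foldl PySem.Dict.erase
        (pvRoundA d.items d T un PySem.Set.empty).1)
      (pvRoundA d.items d T un PySem.Set.empty).2.1
      (pvRoundA d.items d T un PySem.Set.empty).2.2.1
  else (un, T)
termination_by T.toNat + d.size
decreasing_by
  obtain ⟨hne, hT⟩ := h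
  have hkeysmem : ∀ p ∈ d.items, p.1 ∈ d.keys := fun p hp => List.mem_map_of_mem hp
  have hk := pvRoundA_keys d.items d T un PySem.Set.empty hkeysmem
  have hsize : (pvRoundA d.items d T un PySem.Set.empty).1.size = d.size := by
    have : (pvRoundA d.items d T un PySem.Set.empty).1.keys.length = d.keys.length := by rw [hk]
    simpa [PySem.Dict.keys, PySem.Dict.size] using this
  have hTle := pvRoundA_T_le d.items d T un PySem.Set.empty
  have hd2le : ((pvRoundA d.items d T un PySem.Set.empty).2.2.2.foldl PySem.Dict.erase
      (pvRoundA d.items d T un PySem.Set.empty).1).size ≤ d.size := by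
    rw [← hsize]
    simpa [PySem.Dict.size, foldl_erase_items] using List.length_filter_le _ _
  rcases hitems : d.items with _ | ⟨⟨u, s⟩, rest⟩
  · exact absurd hitems hne
  · simp only [← hitems]
    by_cases hs : s = 0
    · -- a zero-share user exists: it lands in `allotted` and is deleted, so the dict shrinks
      have hstep : pvRoundA d.items d T un PySem.Set.empty
          = pvRoundA rest d T un [u] := by
        rw [hitems]; simp [pvRoundA, hs, PySem.Set.add, PySem.Set.empty, PySem.Set.contains]
      have hmem : u ∈ (pvRoundA d.items d T un PySem.Set.empty).2.2.2 := by
        rw [hstep]; exact pvRoundA_al_mono rest d T un [u] u (by simp)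
      have hukeys : u ∈ (pvRoundA d.items d T un PySem.Set.empty).1.keys := by
        rw [hk, PySem.Dict.keys, hitems]; simp
      have hlt : ((pvRoundA d.items d T un PySem.Set.empty).2.2.2.foldl PySem.Dict.erase
          (pvRoundA d.items d T un PySem.Set.empty).1).size
          < (pvRoundA d.items d T un PySem.Set.empty).1.size := by
        simp only [PySem.Dict.size, foldl_erase_items]
        rw [List.length_filter_lt_length_iff_exists]
        obtain ⟨q, hq, hqf⟩ := List.mem_map.mp hukeys
        refine ⟨q, hq, ?_⟩
        simp only [PySem.Set.empty] at hmem
        simp [hqf, hmem]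
      have := Int.toNat_le_toNat hTle
      omega
    · -- head has nonzero shares: totalShares strictly decreases
      have hstep : pvRoundA d.items d T un PySem.Set.empty
          = pvRoundA rest (d.modify u 0 (· - 1)) (T - 1) (PySem.Set.discard un u) PySem.Set.empty := by
        rw [hitems]; simp [pvRoundA, hs, hT]
      have hTle2 : (pvRoundA d.items d T un PySem.Set.empty).2.1 ≤ T - 1 := by
        rw [hstep]; exact pvRoundA_T_le ..
      have h1 := Int.toNat_le_toNat hTle2
      have hpos : d.size > 0 := by simp [PySem.Dict.size, hitems]
      omega

-- body of A's outer `for shares_by_uid in shares_by_uid_by_price.values():` loop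
def pvStepA (st : List Int × Int) (g : PySem.Dict Int Int) : List Int × Int :=
  (st.1 ++ (pvWhileA g st.2 (PySem.Set.ofList g.keys)).1,
   (pvWhileA g st.2 (PySem.Set.ofList g.keys)).2)

-- body of A's grouping loop (`shares_by_uid_by_price[price][uid] = shares` is a modify of the inner dict)
def pvGroupStepA (d : PySem.Dict Int (PySem.Dict Int Int)) (b : Int × Int × Int × Int) :
    PySem.Dict Int (PySem.Dict Int Int) :=
  if d.contains b.2.2.1 then
    d.modify b.2.2.1 PySem.Dict.empty (fun inner => inner.insert b.1 b.2.1)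
  else
    d.insert b.2.2.1 ((PySem.Dict.empty : PySem.Dict Int Int).insert b.1 b.2.1)

def getUnallottedUsers (bids : List (Int × Int × Int × Int)) (totalShares : Int) : List Int :=
  PySem.List.sorted
    ((((PySem.List.sorted2 bids (fun b => b.2.2.1) (fun b => -b.2.2.2) true).foldl
        pvGroupStepA PySem.Dict.empty).values.foldl pvStepA ([], totalShares)).1)
    (fun x => x) false

-- ===== PORT B =====
-- body of B's per-price-group loop: served list, k = max(0, min(totalShares, len(served))),
-- extend with the zero bidders and served[k:], then totalShares -= sum(g.values())
def pvStepB (st : List Int × Int) (g : PySem.Dict Int Int) : List Int × Int :=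
  (st.1 ++ (g.items.filter (fun p => p.2 = 0)).map (·.1)
      ++ PySem.List.slice ((g.items.filter (fun p => p.2 ≠ 0)).map (·.1))
          (some (max 0 (min st.2 ((((g.items.filter (fun p => p.2 ≠ 0)).map (·.1)).length : Nat) : Int)))) none,
   st.2 - g.values.sum)

-- body of B's grouping loop (`groups.setdefault(price, {})[uid] = shares`)
def pvGroupStepB (d : PySem.Dict Int (PySem.Dict Int Int)) (b : Int × Int × Int × Int) :
    PySem.Dict Int (PySem.Dict Int Int) :=
  (d.setdefault b.2.2.1 PySem.Dict.empty).modify b.2.2.1 PySem.Dict.empty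
    (fun inner => inner.insert b.1 b.2.1)

def getUnallottedUsers_alt (bids : List (Int × Int × Int × Int)) (totalShares : Int) : List Int :=
  PySem.List.sorted
    ((((PySem.List.sorted2 bids (fun b => b.2.2.1) (fun b => -b.2.2.2) true).foldl
        pvGroupStepB PySem.Dict.empty).values.foldl pvStepB ([], totalShares)).1)
    (fun x => x) false

-- ===== PRECONDITION & SPEC =====
-- Pre_ excludes bids requesting a NEGATIVE share count — malformed input outside the auction's
-- natural domain, on which A's round-robin silently drains the whole remaining pool inside that
-- price group (the negative count never reaches 0).  A still returns there; this exclusion is a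
-- restriction to the natural domain, not a crash.
def Pre_getUnallottedUsers (bids : List (Int × Int × Int × Int)) (totalShares : Int) : Prop :=
  ∀ b ∈ bids, 0 ≤ b.2.1
instance (bids : List (Int × Int × Int × Int)) (totalShares : Int) : Decidable (Pre_getUnallottedUsers bids totalShares) := by unfold Pre_getUnallottedUsers; infer_instance
def pvWitness_getUnallottedUsers : (List (Int × Int × Int × Int)) × Int := ([(1, 2, 10, 0), (2, 0, 10, 1)], 1)

def Spec_getUnallottedUsers (bids : List (Int × Int × Int × Int)) (totalShares : Int) (out : List Int) : Prop := out = getUnallottedUsers_alt bids totalShares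
instance (bids : List (Int × Int × Int × Int)) (totalShares : Int) (out : List Int) : Decidable (Spec_getUnallottedUsers bids totalShares out) := by unfold Spec_getUnallottedUsers; infer_instance

-- ===== CLAIM (what is proved, stated in full; the proofs are below) =====
def Claim_equal_getUnallottedUsers : Prop := ∀ (bids : List (Int × Int × Int × Int)) (totalShares : Int), Dom_getUnallottedUsers bids totalShares → Pre_getUnallottedUsers bids totalShares → Spec_getUnallottedUsers bids totalShares (getUnallottedUsers bids totalShares)

-- ===== LEMMAS AND PROOFS =====

-- notation for the analysis
def pvServed (l : List (Int × Int)) : List Int := (l.filter (fun p => p.2 ≠ 0)).map (·.1)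
def pvZeros (l : List (Int × Int)) : List Int := (l.filter (fun p => p.2 = 0)).map (·.1)
def pvKB (l : List (Int × Int)) (T : Int) : Int :=
  if 0 < T then min T ((pvServed l).length : Int) else 0
def pvCut (l : List (Int × Int)) (T : Int) : List Int := (pvServed l).take (pvKB l T).toNat
def pvBT (l : List (Int × Int)) (T : Int) : Int :=
  if 0 < T then
    (if (l.map (·.2)).any (fun s => s < 0) then 0 else max 0 (T - (l.map (·.2)).sum))
  else T
def pvDec (l : List (Int × Int)) : List (Int × Int) :=
  (l.filter (fun p => p.2 ≠ 0)).map (fun p => (p.1, p.2 - 1))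

theorem pvRoundA_full (l : List (Int × Int)) (d : PySem.Dict Int Int) (T : Int)
    (un al : PySem.Set Int)
    (h : ((l.filter (fun p => p.2 ≠ 0)).length : Int) ≤ T) :
    pvRoundA l d T un al =
      (l.foldl (fun d p => if p.2 = 0 then d else d.modify p.1 0 (· - 1)) d,
       T - (l.filter (fun p => p.2 ≠ 0)).length,
       un.filter (fun x => decide (x ∉ pvServed l)),
       PySem.Set.update al (pvZeros l)) := by
  induction l generalizing d T un al with
  | nil => simp [pvRoundA, pvServed, pvZeros, PySem.Set.update]
  | cons p rest ih =>
    obtain ⟨u, s⟩ := p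
    have hstep : ∀ m : List (Int × Int), ((u, s) :: m).filter (fun p => p.2 ≠ 0)
        = if s = 0 then m.filter (fun p => p.2 ≠ 0)
          else (u, s) :: m.filter (fun p => p.2 ≠ 0) := by
      intro m
      by_cases hs : s = 0 <;> simp [List.filter_cons, hs]
    by_cases hs : s = 0
    · have h' : ((rest.filter (fun p => p.2 ≠ 0)).length : Int) ≤ T := by
        rw [hstep, if_pos hs] at h; exact h
      have hserved : pvServed ((u, s) :: rest) = pvServed rest := by
        simp [pvServed, List.filter_cons, hs]
      have hzeros : pvZeros ((u, s) :: rest) = u :: pvZeros rest := by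
        simp [pvZeros, List.filter_cons, hs]
      have hrnd : pvRoundA ((u, s) :: rest) d T un al
          = pvRoundA rest d T un (al.add u) := by
        simp [pvRoundA, hs]
      rw [hrnd, ih _ _ _ _ h', hserved, hzeros, hstep, if_pos hs]
      simp only [Prod.mk.injEq]
      exact ⟨by simp [List.foldl_cons, hs], trivial, trivial, by rw [PySem.Set.update_cons]⟩
    · have hcnt : (((u, s) :: rest).filter (fun p => p.2 ≠ 0)).length
          = (rest.filter (fun p => p.2 ≠ 0)).length + 1 := by
        rw [hstep, if_neg hs]; rfl
      have hT : 0 < T := by rw [hcnt] at h; push_cast at h; omega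
      have h' : ((rest.filter (fun p => p.2 ≠ 0)).length : Int) ≤ T - 1 := by
        rw [hcnt] at h; push_cast at h ⊢; omega
      have hserved : pvServed ((u, s) :: rest) = u :: pvServed rest := by
        simp [pvServed, List.filter_cons, hs]
      have hzeros : pvZeros ((u, s) :: rest) = pvZeros rest := by
        simp [pvZeros, List.filter_cons, hs]
      have hrnd : pvRoundA ((u, s) :: rest) d T un al
          = pvRoundA rest (d.modify u 0 (· - 1)) (T - 1) (PySem.Set.discard un u) al := by
        simp [pvRoundA, hs, hT]
      rw [hrnd, ih _ _ _ _ h', hserved, hzeros, hcnt]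
      simp only [Prod.mk.injEq]
      refine ⟨by simp [List.foldl_cons, hs], by push_cast; ring, ?_, trivial⟩
      simp only [PySem.Set.discard, List.filter_filter]
      apply List.filter_congr
      intro x _
      by_cases h1 : x = u <;> by_cases h2 : x ∈ pvServed rest <;> simp [h1, h2]

theorem pvRoundA_partial (l : List (Int × Int)) (d : PySem.Dict Int Int) (T : Int)
    (un al : PySem.Set Int) (h0 : 0 ≤ T)
    (h : T < ((l.filter (fun p => p.2 ≠ 0)).length : Int)) :
    (pvRoundA l d T un al).2.1 = 0 ∧
    (pvRoundA l d T un al).2.2.1 = un.filter (fun x => decide (x ∉ (pvServed l).take T.toNat)) := by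
  induction l generalizing d T un al with
  | nil => simp at h; omega
  | cons p rest ih =>
    obtain ⟨u, s⟩ := p
    have hstep : ((u, s) :: rest).filter (fun p => p.2 ≠ 0)
        = if s = 0 then rest.filter (fun p => p.2 ≠ 0)
          else (u, s) :: rest.filter (fun p => p.2 ≠ 0) := by
      by_cases hs : s = 0 <;> simp [List.filter_cons, hs]
    by_cases hs : s = 0
    · have h' : T < ((rest.filter (fun p => p.2 ≠ 0)).length : Int) := by
        rw [hstep, if_pos hs] at h; exact h
      have hserved : pvServed ((u, s) :: rest) = pvServed rest := by
        simp [pvServed, List.filter_cons, hs]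
      have hrnd : pvRoundA ((u, s) :: rest) d T un al
          = pvRoundA rest d T un (al.add u) := by
        simp [pvRoundA, hs]
      rw [hrnd, hserved]
      exact ih _ _ _ _ h0 h'
    · have hcnt : (((u, s) :: rest).filter (fun p => p.2 ≠ 0)).length
          = (rest.filter (fun p => p.2 ≠ 0)).length + 1 := by
        rw [hstep, if_neg hs]; rfl
      have hserved : pvServed ((u, s) :: rest) = u :: pvServed rest := by
        simp [pvServed, List.filter_cons, hs]
      by_cases hT : 0 < T
      · have h' : T - 1 < ((rest.filter (fun p => p.2 ≠ 0)).length : Int) := by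
          rw [hcnt] at h; push_cast at h ⊢; omega
        have hrnd : pvRoundA ((u, s) :: rest) d T un al
            = pvRoundA rest (d.modify u 0 (· - 1)) (T - 1) (PySem.Set.discard un u) al := by
          simp [pvRoundA, hs, hT]
        obtain ⟨ih1, ih2⟩ := ih (d.modify u 0 (· - 1)) (T - 1) (PySem.Set.discard un u) al
          (by omega) h'
        refine ⟨by rw [hrnd]; exact ih1, ?_⟩
        have hTn : T.toNat = (T - 1).toNat + 1 := by omega
        rw [hrnd, ih2, hserved, hTn, List.take_succ_cons]
        simp only [PySem.Set.discard, List.filter_filter]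
        apply List.filter_congr
        intro x _
        by_cases h1 : x = u <;> by_cases h2 : x ∈ (pvServed rest).take (T - 1).toNat <;>
          simp [h1, h2]
      · have hT0 : T = 0 := by omega
        subst hT0
        have hrnd : pvRoundA ((u, s) :: rest) d 0 un al = (d, 0, un, al) := by
          simp [pvRoundA, hs]
        rw [hrnd]
        simp

theorem pvDfold_items (l : List (Int × Int)) (d : PySem.Dict Int Int) (pre : List (Int × Int))
    (hnd : d.keys.Nodup) (hit : d.items = pre ++ l) :
    (l.foldl (fun d p => if p.2 = 0 then d else d.modify p.1 0 (· - 1)) d).items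
      = pre ++ l.map (fun p => if p.2 = 0 then p else (p.1, p.2 - 1)) := by
  induction l generalizing d pre with
  | nil => simpa using hit
  | cons p rest ih =>
    obtain ⟨u, s⟩ := p
    by_cases hs : s = 0
    · have := ih d (pre ++ [(u, s)]) hnd (by simpa using hit)
      simp only [List.foldl_cons, hs, if_pos rfl] at this ⊢
      simpa [hs] using this
    · have humem : ((u, s)) ∈ d.items := by rw [hit]; simp
      have hc : d.contains u = true := by
        simp only [PySem.Dict.contains]
        exact List.any_eq_true.mpr ⟨(u, s), humem, by simp⟩
      have hgd : d.getD u 0 = s := PySem.Dict.getD_of_mem_items d humem hnd 0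
      have hkeys : d.keys = pre.map (·.1) ++ u :: rest.map (·.1) := by
        simp [PySem.Dict.keys, hit]
      have hnd' := hnd
      rw [hkeys] at hnd'
      have hupre : u ∉ pre.map (·.1) :=
        fun hx => (List.disjoint_of_nodup_append hnd') hx (by simp)
      have hurest : u ∉ rest.map (·.1) := by
        have h2 := (List.nodup_append.mp hnd').2.1
        exact (List.nodup_cons.mp h2).1
      have hmod : (d.modify u 0 (· - 1)).items = pre ++ (u, s - 1) :: rest := by
        simp only [PySem.Dict.modify, hgd]
        rw [PySem.Dict.items_insert_of_contains d _ hc, hit]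
        rw [List.map_append]
        congr 1
        · conv_rhs => rw [← List.map_id pre]
          apply List.map_congr_left
          intro q hq
          have : (q.1 == u) = false := by
            apply beq_eq_false_iff_ne.mpr
            intro hqu
            exact hupre (hqu ▸ List.mem_map_of_mem hq)
          simp [this]
        · rw [List.map_cons]
          simp only [BEq.rfl, if_pos rfl]
          congr 1
          conv_rhs => rw [← List.map_id rest]
          apply List.map_congr_left
          intro q hq
          have : (q.1 == u) = false := by
            apply beq_eq_false_iff_ne.mpr
            intro hqu
            exact hurest (hqu ▸ List.mem_map_of_mem hq)
          simp [this]
      have hndk : (d.modify u 0 (· - 1)).keys.Nodup := by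
        simp only [PySem.Dict.modify]
        rw [PySem.Dict.keys_insert_of_contains d _ hc]
        exact hnd
      have := ih (d.modify u 0 (· - 1)) (pre ++ [(u, s - 1)]) hndk (by simp [hmod])
      simp only [List.foldl_cons, if_neg hs] at this ⊢
      simpa [hs] using this

theorem pvZeroFilter (l : List (Int × Int)) (h : (l.map (·.1)).Nodup) :
    ((l.map (fun p => if p.2 = 0 then p else (p.1, p.2 - 1))).filter
        (fun p => decide (p.1 ∉ pvZeros l))) = pvDec l := by
  have hmem0 : ∀ p ∈ l, (p.1 ∈ pvZeros l ↔ p.2 = 0) := by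
    intro p hp
    constructor
    · intro hz
      obtain ⟨q, hq, hqf⟩ := List.mem_map.mp hz
      have hq0 := List.of_mem_filter hq
      have hql := List.mem_of_mem_filter hq
      have : q = p := List.inj_on_of_nodup_map h hql hp hqf
      subst this
      simpa using hq0
    · intro h0
      exact List.mem_map_of_mem (List.mem_filter.mpr ⟨hp, by simpa using h0⟩)
  rw [List.filter_map]
  unfold pvDec
  have hfil : l.filter ((fun p => decide ((p : Int × Int).1 ∉ pvZeros l)) ∘
      (fun p => if p.2 = 0 then p else (p.1, p.2 - 1))) = l.filter (fun p => p.2 ≠ 0) := by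
    apply List.filter_congr
    intro p hp
    have hfst : ((if p.2 = 0 then p else (p.1, p.2 - 1)) : Int × Int).1 = p.1 := by
      split <;> rfl
    simp only [Function.comp_apply, hfst]
    by_cases h0 : p.2 = 0 <;> simp [h0, hmem0 p hp]
  rw [hfil]
  apply List.map_congr_left
  intro p hp
  have : p.2 ≠ 0 := by simpa using List.of_mem_filter hp
  simp [this]

theorem pvSum_dec (l : List (Int × Int)) :
    ((pvDec l).map (·.2)).sum = (l.map (·.2)).sum - (l.filter (fun p => p.2 ≠ 0)).length := by
  induction l with
  | nil => simp [pvDec]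
  | cons p rest ih =>
    by_cases hs : p.2 = 0
    · simp [pvDec, List.filter_cons, hs, Function.comp] at ih ⊢
      push_cast at ih ⊢
      omega
    · simp [pvDec, List.filter_cons, hs, Function.comp] at ih ⊢
      push_cast at ih ⊢
      omega

theorem pvNeg_dec (l : List (Int × Int)) :
    ((pvDec l).map (·.2)).any (fun s => s < 0) = (l.map (·.2)).any (fun s => s < 0) := by
  induction l with
  | nil => simp [pvDec]
  | cons p rest ih =>
    by_cases hs : p.2 = 0
    · simp [pvDec, List.filter_cons, hs, Function.comp] at ih ⊢
      simpa [hs] using ih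
    · have h1 : p.2 < 1 ↔ p.2 < 0 := by omega
      simp [pvDec, List.filter_cons, hs, Function.comp, h1] at ih ⊢
      rw [ih]

theorem pvCount_le_sum (l : List (Int × Int))
    (h : (l.map (·.2)).any (fun s => s < 0) = false) :
    ((l.filter (fun p => p.2 ≠ 0)).length : Int) ≤ (l.map (·.2)).sum := by
  induction l with
  | nil => simp
  | cons p rest ih =>
    simp only [List.map_cons, List.any_cons, Bool.or_eq_false_iff] at h
    obtain ⟨h1, h2⟩ := h
    have hp : 0 ≤ p.2 := by simpa using h1
    have ihr := ih h2
    by_cases hs : p.2 = 0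
    · simp [List.filter_cons, hs] at ihr ⊢
      omega
    · simp [List.filter_cons, hs] at ihr ⊢
      push_cast at ihr ⊢
      omega

theorem pvTakeDropFilter (l : List Int) (n : Nat) (h : l.Nodup) :
    l.filter (fun x => decide (x ∉ l.take n)) = l.drop n := by
  set t := l.take n with ht
  conv_lhs => rw [← List.take_append_drop n l]
  rw [List.filter_append]
  have h1 : (l.take n).filter (fun x => decide (x ∉ t)) = [] :=
    List.filter_eq_nil_iff.mpr (fun x hx => by simp [ht ▸ hx])
  have hdisj := List.disjoint_take_drop (m := n) (n := n) h le_rfl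
  have h2 : (l.drop n).filter (fun x => decide (x ∉ t)) = l.drop n :=
    List.filter_eq_self.mpr (fun x hx => by
      simp only [decide_eq_true_eq]
      exact fun hx' => hdisj (ht ▸ hx') hx)
  rw [h1, h2, List.nil_append]

theorem pvKeysPerm (l : List (Int × Int)) (h : (l.map (·.1)).Nodup) (n : Nat) :
    ((l.map (·.1)).filter (fun x => decide (x ∉ (pvServed l).take n))).Perm
      (pvZeros l ++ (pvServed l).drop n) := by
  have hperm : (pvZeros l ++ pvServed l).Perm (l.map (·.1)) := by
    have hp := (List.filter_append_perm (fun p => decide (p.2 = 0)) l).map (·.1)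
    rw [List.map_append] at hp
    have e1 : (l.filter (fun p => !decide (p.2 = 0))) = l.filter (fun p => p.2 ≠ 0) := by
      simp
    simpa [pvZeros, pvServed, e1] using hp
  have hnd2 : (pvZeros l ++ pvServed l).Nodup := hperm.symm.nodup h
  have hnds : (pvServed l).Nodup := (List.nodup_append.mp hnd2).2.1
  have hdisj : (pvZeros l).Disjoint (pvServed l) := List.disjoint_of_nodup_append hnd2
  have hfz : (pvZeros l).filter (fun x => decide (x ∉ (pvServed l).take n)) = pvZeros l :=
    List.filter_eq_self.mpr (fun x hx => by
      simp only [decide_eq_true_eq]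
      exact fun hmem => hdisj hx (List.take_subset _ _ hmem))
  have hstep2 : ((pvZeros l ++ pvServed l).filter (fun x => decide (x ∉ (pvServed l).take n)))
      = pvZeros l ++ (pvServed l).drop n := by
    rw [List.filter_append, hfz, pvTakeDropFilter _ _ hnds]
  exact hstep2 ▸ ((hperm.symm).filter _)

theorem pvTriv (d : PySem.Dict Int Int) (T : Int) (un : PySem.Set Int)
    (hc : ¬(d.items ≠ [] ∧ 0 < T)) :
    un.filter (fun x => decide (x ∉ pvCut d.items T)) = un ∧ pvBT d.items T = T := by
  by_cases hT : 0 < T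
  · have hnil : d.items = [] := by tauto
    rw [hnil]
    constructor
    · have he : pvCut ([] : List (Int × Int)) T = [] := by
        simp [pvCut, pvServed]
      rw [he]
      simp
    · simp only [pvBT, if_pos hT, List.map_nil, List.any_nil, List.sum_nil, Bool.false_eq_true,
        if_false]
      omega
  · constructor
    · have he : pvCut d.items T = [] := by
        simp [pvCut, pvKB, hT]
      rw [he]
      simp
    · simp [pvBT, hT]

theorem pvWhileA_eq (n : Nat) (d : PySem.Dict Int Int) (T : Int) (un : PySem.Set Int)
    (hn : T.toNat + d.size ≤ n) (hnd : d.keys.Nodup) :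
    pvWhileA d T un = (un.filter (fun x => decide (x ∉ pvCut d.items T)), pvBT d.items T) := by
  induction n generalizing d T un with
  | zero =>
    have hc : ¬(d.items ≠ [] ∧ 0 < T) := by
      rintro ⟨h1, h2⟩
      have h3 : 0 < d.items.length := List.length_pos_of_ne_nil h1
      have : d.size = d.items.length := rfl
      omega
    rw [pvWhileA, dif_neg hc]
    obtain ⟨e1, e2⟩ := pvTriv d T un hc
    rw [e1, e2]
  | succ m ih =>
    by_cases hc : d.items ≠ [] ∧ 0 < T
    · obtain ⟨hne, hT⟩ := hc
      have hndm : (d.items.map (·.1)).Nodup := by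
        simpa [PySem.Dict.keys] using hnd
      by_cases hfull : ((d.items.filter (fun p => p.2 ≠ 0)).length : Int) ≤ T
      · -- a full round is executed
        rw [pvWhileA, dif_pos ⟨hne, hT⟩, pvRoundA_full d.items d T un PySem.Set.empty hfull]
        dsimp only
        have hznd : (pvZeros d.items).Nodup := by
          apply List.Sublist.nodup _ hndm
          simp only [pvZeros]
          exact List.Sublist.map _ List.filter_sublist
        have hal : PySem.Set.update PySem.Set.empty (pvZeros d.items) = pvZeros d.items := by
          rw [show (PySem.Set.empty : PySem.Set Int) = [] from rfl, PySem.Set.update_nil_left,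
            PySem.Set.ofList_eq_self_of_nodup _ hznd]
        rw [hal]
        have hd1 : (d.items.foldl (fun d p => if p.2 = 0 then d else d.modify p.1 0 (· - 1)) d).items
            = d.items.map (fun p => if p.2 = 0 then p else (p.1, p.2 - 1)) :=
          pvDfold_items d.items d [] hnd (by simp)
        have hd2 : ((pvZeros d.items).foldl PySem.Dict.erase
            (d.items.foldl (fun d p => if p.2 = 0 then d else d.modify p.1 0 (· - 1)) d)).items
            = pvDec d.items := by
          rw [foldl_erase_items, hd1, pvZeroFilter _ hndm]
        have hk2 : ((pvZeros d.items).foldl PySem.Dict.erase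
            (d.items.foldl (fun d p => if p.2 = 0 then d else d.modify p.1 0 (· - 1)) d)).keys
            = pvServed d.items := by
          simp only [PySem.Dict.keys, hd2, pvDec, pvServed, List.map_map]
          rfl
        have hnd2 : ((pvZeros d.items).foldl PySem.Dict.erase
            (d.items.foldl (fun d p => if p.2 = 0 then d else d.modify p.1 0 (· - 1)) d)).keys.Nodup := by
          rw [hk2]
          apply List.Sublist.nodup _ hndm
          simp only [pvServed]
          exact List.Sublist.map _ List.filter_sublist
        have hsize2 : ((pvZeros d.items).foldl PySem.Dict.erase
            (d.items.foldl (fun d p => if p.2 = 0 then d else d.modify p.1 0 (· - 1)) d)).size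
            = (d.items.filter (fun p => p.2 ≠ 0)).length := by
          simp only [PySem.Dict.size, hd2, pvDec, List.length_map]
        have h1 : 0 < d.items.length := List.length_pos_of_ne_nil hne
        have h2 : (d.items.filter (fun p => p.2 ≠ 0)).length ≤ d.items.length :=
          List.length_filter_le _ _
        have hds : d.size = d.items.length := rfl
        rw [ih _ _ _ (by rw [hsize2]; omega) hnd2]
        have hlen : (pvServed d.items).length = (d.items.filter (fun p => p.2 ≠ 0)).length := by
          simp [pvServed]
        have hcutT : pvCut d.items T = pvServed d.items := by
          simp only [pvCut, pvKB, if_pos hT, hlen]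
          rw [min_eq_right hfull, Int.toNat_natCast, ← hlen, List.take_length]
        refine Prod.ext ?_ ?_
        · dsimp only
          rw [List.filter_filter, hcutT]
          apply List.filter_congr
          intro x _
          by_cases hx : x ∈ pvServed d.items
          · simp [hx]
          · have hx2 : x ∉ pvCut ((pvZeros d.items).foldl PySem.Dict.erase
                (d.items.foldl (fun d p => if p.2 = 0 then d else d.modify p.1 0 (· - 1)) d)).items
                (T - (d.items.filter (fun p => p.2 ≠ 0)).length) := by
              intro hmem
              apply hx
              have hss := List.take_subset _ _ hmem
              obtain ⟨q, hq, rfl⟩ := List.mem_map.mp hss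
              have hq2 := List.mem_of_mem_filter hq
              rw [hd2] at hq2
              simp only [pvDec] at hq2
              obtain ⟨r, hr, hqr⟩ := List.mem_map.mp hq2
              have hq1 : q.1 = r.1 := by rw [← hqr]
              rw [hq1]
              simp only [pvServed]
              exact List.mem_map_of_mem hr
            simp only [decide_eq_true hx, decide_eq_true hx2, Bool.and_self]
        · dsimp only
          rw [hd2]
          by_cases hpos : 0 < T - (d.items.filter (fun p => p.2 ≠ 0)).length
          · simp only [pvBT, if_pos hpos, if_pos hT, pvNeg_dec, pvSum_dec]
            by_cases hneg : (d.items.map (·.2)).any (fun s => s < 0) = true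
            · rw [if_pos hneg, if_pos hneg]
            · rw [if_neg hneg, if_neg hneg]
              congr 1
              ring
          · simp only [pvBT, if_neg hpos, if_pos hT]
            by_cases hneg : (d.items.map (·.2)).any (fun s => s < 0) = true
            · rw [if_pos hneg]
              omega
            · rw [if_neg hneg]
              have hcs := pvCount_le_sum d.items (by simpa using hneg)
              omega
      · -- totalShares runs out mid-round
        push_neg at hfull
        obtain ⟨e1, e2⟩ := pvRoundA_partial d.items d T un PySem.Set.empty hT.le hfull
        rw [pvWhileA, dif_pos ⟨hne, hT⟩, e1, e2, pvWhileA, dif_neg (by simp)]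
        have hcut : pvCut d.items T = (pvServed d.items).take T.toNat := by
          have hlen : (pvServed d.items).length = (d.items.filter (fun p => p.2 ≠ 0)).length := by
            simp [pvServed]
          simp only [pvCut, pvKB, if_pos hT, hlen]
          rw [min_eq_left hfull.le]
        have hbt : pvBT d.items T = 0 := by
          simp only [pvBT, if_pos hT]
          by_cases hneg : (d.items.map (·.2)).any (fun s => s < 0) = true
          · rw [if_pos hneg]
          · rw [if_neg hneg]
            have hcs := pvCount_le_sum d.items (by simpa using hneg)
            omega
        rw [hcut, hbt]
    · rw [pvWhileA, dif_neg hc]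
      obtain ⟨e1, e2⟩ := pvTriv d T un hc
      rw [e1, e2]

-- one step: the totalShares counters of A and B agree in sign, and agree exactly while positive
theorem pvStep_eq (stA stB : List Int × Int) (g : PySem.Dict Int Int)
    (hnd : g.keys.Nodup) (hvals : ∀ v ∈ g.values, 0 ≤ v)
    (hp : stA.1.Perm stB.1) (hiff : 0 < stA.2 ↔ 0 < stB.2) (heq : 0 < stA.2 → stA.2 = stB.2) :
    ((0 < (pvStepA stA g).2 ↔ 0 < (pvStepB stB g).2)
      ∧ (0 < (pvStepA stA g).2 → (pvStepA stA g).2 = (pvStepB stB g).2))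
    ∧ (pvStepA stA g).1.Perm (pvStepB stB g).1 := by
  have hndm : (g.items.map (·.1)).Nodup := by
    simpa [PySem.Dict.keys] using hnd
  have hofl : PySem.Set.ofList g.keys = g.keys := PySem.Set.ofList_eq_self_of_nodup _ hnd
  have hW := pvWhileA_eq (stA.2.toNat + g.size) g stA.2 g.keys le_rfl hnd
  have hkeys : g.keys = g.items.map (·.1) := rfl
  have hvals' : ∀ v ∈ g.items.map (·.2), 0 ≤ v := hvals
  have hneg : (g.items.map (·.2)).any (fun s => s < 0) = false := by
    apply List.any_eq_false.mpr
    intro s hs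
    simpa using hvals' s hs
  have hS : 0 ≤ (g.items.map (·.2)).sum := List.sum_nonneg hvals'
  have hlen : (pvServed g.items).length = (g.items.filter (fun p => p.2 ≠ 0)).length := by
    simp [pvServed]
  have hk : max 0 (min stB.2 ((((g.items.filter (fun p => p.2 ≠ 0)).map (·.1)).length : Nat) : Int))
      = pvKB g.items stA.2 := by
    simp only [pvKB, hlen, List.length_map]
    by_cases hTA : 0 < stA.2
    · rw [if_pos hTA, ← heq hTA]
      exact max_eq_right (le_min hTA.le (Int.natCast_nonneg _))
    · rw [if_neg hTA]
      have hTB : ¬ 0 < stB.2 := fun h => hTA (hiff.mpr h)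
      have : min stB.2 (((g.items.filter (fun p => p.2 ≠ 0)).length : Nat) : Int) ≤ 0 :=
        le_trans (min_le_left _ _) (by omega)
      omega
  have hk0 : (0 : Int) ≤ pvKB g.items stA.2 := by
    rw [← hk]; exact le_max_left _ _
  have hsum : g.values.sum = (g.items.map (·.2)).sum := rfl
  constructor
  · simp only [pvStepA, pvStepB, hofl, hW, pvBT, hneg, hsum, Bool.false_eq_true, if_false]
    by_cases hTA : 0 < stA.2
    · rw [if_pos hTA, ← heq hTA]
      by_cases hle : stA.2 - (g.items.map (·.2)).sum ≤ 0
      · rw [max_eq_left hle]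
        constructor
        · constructor <;> intro h <;> omega
        · intro h; omega
      · rw [max_eq_right (by omega : (0:Int) ≤ stA.2 - (g.items.map (·.2)).sum)]
        exact ⟨Iff.rfl, fun _ => rfl⟩
    · rw [if_neg hTA]
      have hTB : ¬ 0 < stB.2 := fun h => hTA (hiff.mpr h)
      constructor
      · constructor <;> intro h <;> omega
      · intro h; omega
  · simp only [pvStepA, pvStepB, hofl, hW, hk]
    rw [PySem.List.slice_from _ hk0]
    have hper := pvKeysPerm g.items hndm (pvKB g.items stA.2).toNat
    rw [← hkeys] at hper
    have hcut : pvCut g.items stA.2 = (pvServed g.items).take (pvKB g.items stA.2).toNat := rfl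
    rw [hcut]
    have hc := hp.append hper
    simpa [pvZeros, pvServed, List.append_assoc] using hc

theorem pvFold_eq (vl : List (PySem.Dict Int Int)) (stA stB : List Int × Int)
    (hnd : ∀ g ∈ vl, g.keys.Nodup) (hvals : ∀ g ∈ vl, ∀ v ∈ g.values, 0 ≤ v)
    (hp : stA.1.Perm stB.1) (hiff : 0 < stA.2 ↔ 0 < stB.2) (heq : 0 < stA.2 → stA.2 = stB.2) :
    (vl.foldl pvStepA stA).1.Perm (vl.foldl pvStepB stB).1 := by
  induction vl generalizing stA stB with
  | nil => exact hp
  | cons g rest ih =>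
    obtain ⟨⟨h1, h2⟩, h3⟩ := pvStep_eq stA stB g (hnd g (by simp)) (hvals g (by simp)) hp hiff heq
    exact ih _ _ (fun g' hg' => hnd g' (List.mem_cons_of_mem _ hg'))
      (fun g' hg' => hvals g' (List.mem_cons_of_mem _ hg')) h3 h1 h2

theorem pvGroupStep_eq (d : PySem.Dict Int (PySem.Dict Int Int)) (b : Int × Int × Int × Int) :
    pvGroupStepA d b = pvGroupStepB d b := by
  unfold pvGroupStepA pvGroupStepB
  by_cases hc : d.contains b.2.2.1
  · rw [if_pos hc, PySem.Dict.setdefault_of_contains d _ hc]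
  · rw [if_neg hc]
    have hcf : d.contains b.2.2.1 = false := by simpa using hc
    have hget : (d.setdefault b.2.2.1 PySem.Dict.empty).getD b.2.2.1 PySem.Dict.empty
        = PySem.Dict.empty := by
      rw [PySem.Dict.getD_setdefault_self, PySem.Dict.getD_of_not_contains d _ hcf]
    simp only [PySem.Dict.modify, hget]
    have hsd : (d.setdefault b.2.2.1 PySem.Dict.empty).items
        = d.items ++ [(b.2.2.1, PySem.Dict.empty)] := by
      simp [PySem.Dict.setdefault, hcf]
    have hc2 : (d.setdefault b.2.2.1 PySem.Dict.empty).contains b.2.2.1 = true := by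
      simp [PySem.Dict.contains, hsd]
    have hnotin : ∀ q ∈ d.items, (q.1 == b.2.2.1) = false := by
      intro q hq
      rw [beq_eq_false_iff_ne]
      intro hqe
      have hct : d.contains b.2.2.1 = true := by
        simp only [PySem.Dict.contains]
        exact List.any_eq_true.mpr ⟨q, hq, by simp [hqe]⟩
      rw [hct] at hcf
      cases hcf
    apply PySem.Dict.ext
    rw [PySem.Dict.items_insert_of_contains _ _ hc2,
      PySem.Dict.items_insert_of_not_contains d _ hcf, hsd, List.map_append]
    congr 1
    · conv_lhs => rw [← List.map_id d.items]
      apply List.map_congr_left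
      intro q hq
      simp [hnotin q hq]
    · simp

theorem pvGroup_nodup (l : List (Int × Int × Int × Int)) (d : PySem.Dict Int (PySem.Dict Int Int))
    (h : ∀ g ∈ d.values, g.keys.Nodup) :
    ∀ g ∈ (l.foldl pvGroupStepA d).values, g.keys.Nodup := by
  induction l generalizing d with
  | nil => simpa using h
  | cons b rest ih =>
    rw [List.foldl_cons]
    apply ih
    intro g hg
    have hinner : (d.getD b.2.2.1 PySem.Dict.empty).keys.Nodup := by
      by_cases hcd : d.contains b.2.2.1
      · obtain ⟨v, hv⟩ : ∃ v, d.get? b.2.2.1 = some v := by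
          have := PySem.Dict.contains_eq_isSome_get? d b.2.2.1
          rw [hcd] at this
          exact Option.isSome_iff_exists.mp this.symm
        rw [PySem.Dict.getD_of_get?_eq_some d _ hv]
        have hmem : v ∈ d.values :=
          List.mem_map_of_mem (PySem.Dict.mem_items_of_get?_eq_some d hv)
        exact h v hmem
      · rw [PySem.Dict.getD_of_not_contains d _ (by simpa using hcd)]
        exact PySem.Dict.nodup_keys_empty
    unfold pvGroupStepA at hg
    by_cases hcd : d.contains b.2.2.1
    · rw [if_pos hcd] at hg
      simp only [PySem.Dict.modify] at hg
      rcases PySem.Dict.mem_values_insert _ _ _ _ hg with rfl | hgv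
      · exact PySem.Dict.nodup_keys_insert _ _ _ hinner
      · exact h _ hgv
    · rw [if_neg hcd] at hg
      rcases PySem.Dict.mem_values_insert _ _ _ _ hg with rfl | hgv
      · exact PySem.Dict.nodup_keys_insert _ _ _ PySem.Dict.nodup_keys_empty
      · exact h _ hgv

theorem pvGroup_vals_nonneg (l : List (Int × Int × Int × Int))
    (d : PySem.Dict Int (PySem.Dict Int Int))
    (hl : ∀ b ∈ l, 0 ≤ b.2.1) (h : ∀ g ∈ d.values, ∀ v ∈ g.values, 0 ≤ v) :
    ∀ g ∈ (l.foldl pvGroupStepA d).values, ∀ v ∈ g.values, 0 ≤ v := by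
  induction l generalizing d with
  | nil => simpa using h
  | cons b rest ih =>
    rw [List.foldl_cons]
    apply ih
    · exact fun b' hb' => hl b' (List.mem_cons_of_mem _ hb')
    intro g hg
    have hb0 : 0 ≤ b.2.1 := hl b (List.mem_cons_self ..)
    have hinner : ∀ v ∈ (d.getD b.2.2.1 PySem.Dict.empty).values, 0 ≤ v := by
      by_cases hcd : d.contains b.2.2.1
      · obtain ⟨w, hw⟩ : ∃ w, d.get? b.2.2.1 = some w := by
          have := PySem.Dict.contains_eq_isSome_get? d b.2.2.1
          rw [hcd] at this
          exact Option.isSome_iff_exists.mp this.symm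
        rw [PySem.Dict.getD_of_get?_eq_some d _ hw]
        exact h w (List.mem_map_of_mem (PySem.Dict.mem_items_of_get?_eq_some d hw))
      · rw [PySem.Dict.getD_of_not_contains d _ (by simpa using hcd)]
        simp [PySem.Dict.values, PySem.Dict.empty]
    unfold pvGroupStepA at hg
    by_cases hcd : d.contains b.2.2.1
    · rw [if_pos hcd] at hg
      simp only [PySem.Dict.modify] at hg
      rcases PySem.Dict.mem_values_insert _ _ _ _ hg with rfl | hgv
      · intro v hv
        rcases PySem.Dict.mem_values_insert _ _ _ _ hv with rfl | hv2
        · exact hb0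
        · exact hinner v hv2
      · exact h _ hgv
    · rw [if_neg hcd] at hg
      rcases PySem.Dict.mem_values_insert _ _ _ _ hg with rfl | hgv
      · intro v hv
        rcases PySem.Dict.mem_values_insert _ _ _ _ hv with rfl | hv2
        · exact hb0
        · simp [PySem.Dict.values, PySem.Dict.empty] at hv2
      · exact h _ hgv

-- ===== VERDICT (by name: the statement is the Claim_ definition above) =====
theorem getUnallottedUsers_spec : Claim_equal_getUnallottedUsers := by
  intro bids totalShares _ hpre
  unfold Spec_getUnallottedUsers getUnallottedUsers getUnallottedUsers_alt
  have hg : (PySem.List.sorted2 bids (fun b => b.2.2.1) (fun b => -b.2.2.2) true).foldl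
      pvGroupStepA PySem.Dict.empty
      = (PySem.List.sorted2 bids (fun b => b.2.2.1) (fun b => -b.2.2.2) true).foldl
      pvGroupStepB PySem.Dict.empty :=
    List.foldl_ext _ _ _ (fun d b _ => pvGroupStep_eq d b)
  rw [← hg]
  have hpre' : ∀ b ∈ PySem.List.sorted2 bids (fun b => b.2.2.1) (fun b => -b.2.2.2) true,
      0 ≤ b.2.1 := by
    intro b hb
    exact hpre b ((PySem.List.sorted2_perm ..).mem_iff.mp hb)
  have hnd := pvGroup_nodup (PySem.List.sorted2 bids (fun b => b.2.2.1) (fun b => -b.2.2.2) true)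
    PySem.Dict.empty (by simp [PySem.Dict.values, PySem.Dict.empty])
  have hvals := pvGroup_vals_nonneg
    (PySem.List.sorted2 bids (fun b => b.2.2.1) (fun b => -b.2.2.2) true)
    PySem.Dict.empty hpre' (by simp [PySem.Dict.values, PySem.Dict.empty])
  have := pvFold_eq ((PySem.List.sorted2 bids (fun b => b.2.2.1) (fun b => -b.2.2.2) true).foldl
      pvGroupStepA PySem.Dict.empty).values ([], totalShares) ([], totalShares) hnd hvals
      (List.Perm.refl _) Iff.rfl (fun _ => rfl)
  exact (PySem.List.sorted_id_eq_sorted_id_iff_perm _ _).mpr this
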